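-- pv_equiv track=rewrite | github.com/KayCeeTech/Problem-Solving-python | index_itself.py | element_of_product
-- ===== SOURCE A (Python) =====
-- def element_of_product(number):
--     new_arr = []
--     for i in range(len(number)):
--         product = 1
--         for j in range(len(number)):
--             if number[i] != number[j]:
--                 product *= number[j]
--         new_arr.append(product)
--
--     return new_arr
-- ===== SOURCE B (Python) =====
-- def element_of_product(number):
--     # Group by value: product over elements != number[i] via per-value powers
--     # and prefix/suffix products over the distinct values (O(n) multiplications).
--     counts = {}
--     for x in number:
--         counts[x] = counts.get(x, 0) + 1
--     items = list(counts.items())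
--     sufs = []
--     running = 1
--     for v, c in reversed(items):
--         sufs.append(running)
--         running *= v ** c
--     sufs.reverse()
--     memo = {}
--     prefix = 1
--     for (v, c), s in zip(items, sufs):
--         memo[v] = prefix * s
--         prefix *= v ** c
--     return [memo[x] for x in number]
-- ===== Notes on version B (the rewrite author's own statement) =====
-- stated objective: faster
-- what changed: Replaces A's O(n^2) double loop by grouping equal values with a counter, raising each distinct value to its multiplicity, and taking prefix/suffix products over the distinct values, then mapping each element to its precomputed answer.
import Mathlib
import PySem

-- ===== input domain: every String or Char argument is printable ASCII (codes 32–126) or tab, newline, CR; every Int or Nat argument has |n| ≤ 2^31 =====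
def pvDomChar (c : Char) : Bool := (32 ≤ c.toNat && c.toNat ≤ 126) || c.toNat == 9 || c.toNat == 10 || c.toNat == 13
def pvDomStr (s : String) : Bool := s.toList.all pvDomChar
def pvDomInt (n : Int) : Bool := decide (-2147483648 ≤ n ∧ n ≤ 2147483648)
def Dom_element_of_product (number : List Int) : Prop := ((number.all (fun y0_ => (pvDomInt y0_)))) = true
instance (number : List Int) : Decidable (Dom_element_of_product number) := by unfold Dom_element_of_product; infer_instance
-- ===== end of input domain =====

-- B replaces A's quadratic double loop by grouping equal values (a counter), per-value powers,
-- and prefix/suffix products over the distinct values: O(n) multiplications instead of O(n^2).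

-- ===== PORT A =====
def element_of_product (number : List Int) : List Int :=
  (PySem.List.pyRange 0 (PySem.List.len number)).foldl (fun new_arr i =>
    new_arr ++ [(PySem.List.pyRange 0 (PySem.List.len number)).foldl (fun product j =>
      if PySem.List.pyGetD number i 0 ≠ PySem.List.pyGetD number j 0 then
        product * PySem.List.pyGetD number j 0
      else product) 1]) []

-- ===== PORT B =====
-- loop body of Source B's suffix pass: sufs.append(running); running *= v ** c
def pvStep1 (p : List Int × Int) (vc : Int × Int) : List Int × Int :=
  (p.1 ++ [p.2], p.2 * vc.1 ^ vc.2.toNat)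

-- loop body of Source B's prefix pass: memo[v] = prefix * s; prefix *= v ** c
def pvStep2 (p : PySem.Dict Int Int × Int) (vcs : (Int × Int) × Int) :
    PySem.Dict Int Int × Int :=
  (p.1.insert vcs.1.1 (p.2 * vcs.2), p.2 * vcs.1.1 ^ vcs.1.2.toNat)

def element_of_product_alt (number : List Int) : List Int :=
  let counts := number.foldl (fun d x => d.insert x (d.getD x 0 + 1)) PySem.Dict.empty
  let items := counts.items
  let sufs := ((items.reverse).foldl pvStep1 ([], 1)).1.reverse
  let memo := ((items.zip sufs).foldl pvStep2 (PySem.Dict.empty, 1)).1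
  -- memo[x] in Source B: every x of number is a key of memo, so the default is never used
  number.map (fun x => memo.getD x 0)

-- ===== PRECONDITION & SPEC =====
def Spec_element_of_product (number : List Int) (out : List Int) : Prop := out = element_of_product_alt number
instance (number : List Int) (out : List Int) : Decidable (Spec_element_of_product number out) := by unfold Spec_element_of_product; infer_instance

-- ===== CLAIM (what is proved, stated in full; the proofs are below) =====
def Claim_equal_element_of_product : Prop := ∀ (number : List Int), Dom_element_of_product number → Spec_element_of_product number (element_of_product number)

-- ===== LEMMAS AND PROOFS =====

-- the reference value: product of all elements of l different from x
def pvRef (x : Int) (l : List Int) : Int := (l.filter (fun y => decide (x ≠ y))).prod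

def pvPw (vc : Int × Int) : Int := vc.1 ^ vc.2.toNat
def pvG (its : List (Int × Int)) : Int := (its.map pvPw).prod

-- specification of Source B's sufs list: k-th entry = product of group powers after position k
def pvSufsOf : List (Int × Int) → List Int
  | [] => []
  | _ :: t => pvG t :: pvSufsOf t

-- running-prefix values collected by pvStep1
def pvPresc (r : Int) : List (Int × Int) → List Int
  | [] => []
  | vc :: t => r :: pvPresc (r * pvPw vc) t

lemma pvStep1_spec (l : List (Int × Int)) : ∀ s0 r0,
    l.foldl pvStep1 (s0, r0) = (s0 ++ pvPresc r0 l, r0 * pvG l) := by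
  induction l with
  | nil => simp [pvPresc, pvG]
  | cons vc t ih =>
    intro s0 r0
    simp [List.foldl_cons, pvStep1, pvPresc, pvG, pvPw, ih, mul_assoc]

lemma pvPresc_append (l1 l2 : List (Int × Int)) : ∀ r,
    pvPresc r (l1 ++ l2) = pvPresc r l1 ++ pvPresc (r * pvG l1) l2 := by
  induction l1 with
  | nil => simp [pvPresc, pvG]
  | cons vc t ih =>
    intro r
    simp [pvPresc, pvG, pvPw, ih, mul_assoc]

lemma pvG_reverse (l : List (Int × Int)) : pvG l.reverse = pvG l := by
  simp [pvG, List.map_reverse, List.prod_reverse]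

lemma pvSufs_eq (l : List (Int × Int)) : (pvPresc 1 l.reverse).reverse = pvSufsOf l := by
  induction l with
  | nil => rfl
  | cons vc t ih =>
    simp [List.reverse_cons, pvPresc_append, pvPresc, pvSufsOf, pvG_reverse, ih]

lemma pvStep2_none (l : List (Int × Int)) (x : Int) : ∀ (sufs : List Int)
    (memo : PySem.Dict Int Int) (p : Int), x ∉ l.map (·.1) →
    ((l.zip sufs).foldl pvStep2 (memo, p)).1.getD x 0 = memo.getD x 0 := by
  induction l with
  | nil => intro sufs memo p _; simp
  | cons vc t ih =>
    intro sufs memo p hx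
    simp only [List.mem_map, not_exists, not_and] at hx
    cases sufs with
    | nil => simp
    | cons s ss =>
      simp only [List.zip_cons_cons, List.foldl_cons, pvStep2]
      have hxt : x ∉ t.map (·.1) := by
        simp only [List.mem_map, not_exists, not_and]
        intro a ha; exact hx a (List.mem_cons_of_mem _ ha)
      rw [ih ss _ _ hxt]
      exact PySem.Dict.getD_insert_of_ne _ _ _ (fun h => hx vc (List.mem_cons_self ..) h.symm)

lemma pvStep2_spec (l : List (Int × Int)) (x : Int) : ∀ (memo : PySem.Dict Int Int) (p : Int),
    x ∈ l.map (·.1) → (l.map (·.1)).Nodup →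
    ((l.zip (pvSufsOf l)).foldl pvStep2 (memo, p)).1.getD x 0 =
      p * pvG (l.filter (fun vc => decide (x ≠ vc.1))) := by
  induction l with
  | nil => intro memo p hx _; simp at hx
  | cons vc t ih =>
    intro memo p hx hnd
    simp only [List.map_cons, List.nodup_cons, List.mem_map] at hnd
    simp only [pvSufsOf, List.zip_cons_cons, List.foldl_cons, pvStep2]
    by_cases hxv : x = vc.1
    · subst hxv
      have hxt : vc.1 ∉ t.map (·.1) := by
        simpa [List.mem_map] using hnd.1
      rw [pvStep2_none t vc.1 _ _ _ hxt, PySem.Dict.getD_insert_self]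
      have hfilter : t.filter (fun p => decide (vc.1 ≠ p.1)) = t := by
        apply List.filter_eq_self.mpr
        intro a ha
        simp only [decide_eq_true_eq]
        intro h
        exact hnd.1 ⟨a, ha, h.symm⟩
      rw [List.filter_cons, if_neg (by simp), hfilter]
    · have hxt : x ∈ t.map (·.1) := by
        rcases List.mem_cons.mp hx with h | h
        · exact absurd h hxv
        · exact h
      rw [ih _ _ hxt hnd.2]
      rw [List.filter_cons, if_pos (by simpa using hxv)]
      simp [pvG, pvPw, mul_assoc]

lemma pvInner (x : Int) (l : List Int) : ∀ a,
    l.foldl (fun p y => if x ≠ y then p * y else p) a = a * pvRef x l := by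
  induction l with
  | nil => intro a; simp [pvRef]
  | cons y t ih =>
    intro a
    by_cases h : x = y
    · rw [List.foldl_cons, if_neg (by simp [h]), ih a]
      simp [pvRef, h]
    · rw [List.foldl_cons, if_pos h, ih (a * y)]
      simp [pvRef, h, mul_assoc]

lemma pvAeq (number : List Int) :
    element_of_product number = number.map (fun x => pvRef x number) := by
  unfold element_of_product
  rw [PySem.List.foldl_append_singleton_eq_map]
  simp only [List.nil_append]
  have hmm : List.map (fun i => (PySem.List.pyRange 0 (PySem.List.len number)).foldl
      (fun product j => if PySem.List.pyGetD number i 0 ≠ PySem.List.pyGetD number j 0 then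
        product * PySem.List.pyGetD number j 0 else product) 1)
      (PySem.List.pyRange 0 (PySem.List.len number)) =
    List.map (fun x => (PySem.List.pyRange 0 (PySem.List.len number)).foldl
      (fun product j => if x ≠ PySem.List.pyGetD number j 0 then
        product * PySem.List.pyGetD number j 0 else product) 1)
      (List.map (fun i => PySem.List.pyGetD number i 0)
        (PySem.List.pyRange 0 (PySem.List.len number))) := by
    rw [List.map_map]; rfl
  rw [hmm, PySem.List.map_pyGetD_pyRange_zero]
  apply List.map_congr_left
  intro x _
  have h2 : (PySem.List.pyRange 0 (PySem.List.len number)).foldl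
      (fun product j => if x ≠ PySem.List.pyGetD number j 0 then
        product * PySem.List.pyGetD number j 0 else product) 1
      = (List.map (fun j => PySem.List.pyGetD number j 0)
          (PySem.List.pyRange 0 (PySem.List.len number))).foldl
        (fun p y => if x ≠ y then p * y else p) 1 := by
    rw [List.foldl_map]
  rw [h2, PySem.List.map_pyGetD_pyRange_zero, pvInner x number 1, one_mul]

lemma pvCount (l : List Int) (x : Int) :
    pvG (((PySem.Set.ofList l).map (fun k => (k, (l.count k : Int)))).filter
      (fun vc => decide (x ≠ vc.1))) = pvRef x l := by
  classical
  unfold pvRef pvG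
  rw [List.filter_map, List.map_map]
  have htf : (l.filter (fun y => decide (x ≠ y))).dedup.toFinset
      = (l.filter (fun y => decide (x ≠ y))).toFinset := by
    ext a; simp
  rw [Finset.prod_list_count (l.filter (fun y => decide (x ≠ y))), ← htf,
    List.prod_toFinset _ (List.nodup_dedup _)]
  have hcong : (l.filter (fun y => decide (x ≠ y))).dedup.map
        (fun m => m ^ List.count m (l.filter (fun y => decide (x ≠ y))))
      = (l.filter (fun y => decide (x ≠ y))).dedup.map (fun m => m ^ List.count m l) := by
    apply List.map_congr_left
    intro m hm
    rw [List.count_filter (p := fun y => decide (x ≠ y))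
      (List.mem_filter.mp (List.mem_dedup.mp hm)).2]
  rw [hcong]
  have hL : List.map (pvPw ∘ fun k => (k, (l.count k : Int)))
      (List.filter ((fun vc => decide (x ≠ vc.1)) ∘ fun k => (k, (l.count k : Int)))
        (PySem.Set.ofList l))
      = ((PySem.Set.ofList l).filter (fun y => decide (x ≠ y))).map
          (fun k => k ^ List.count k l) := by
    simp [pvPw, Function.comp_def]
  rw [hL]
  apply List.Perm.prod_eq
  apply List.Perm.map
  apply List.perm_of_nodup_nodup_toFinset_eq
  · exact (PySem.Set.nodup_ofList l).filter _
  · exact List.nodup_dedup _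
  · ext a
    simp [List.mem_filter, List.mem_dedup, List.mem_toFinset, PySem.Set.mem_ofList]

lemma pvBeq (number : List Int) :
    element_of_product_alt number = number.map (fun x => pvRef x number) := by
  unfold element_of_product_alt
  simp only [PySem.Dict.foldl_insert_getD_add_one_eq_counter, PySem.Dict.items_counter]
  have hsufs : ∀ l : List (Int × Int), ((l.reverse).foldl pvStep1 ([], 1)).1.reverse = pvSufsOf l := by
    intro l
    rw [pvStep1_spec]
    simp [pvSufs_eq]
  rw [hsufs]
  apply List.map_congr_left
  intro x hx
  set items := (PySem.Set.ofList number).map (fun k => (k, (number.count k : Int))) with hitems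
  have hkeys : items.map (·.1) = PySem.Set.ofList number := by
    simp [hitems, List.map_map, Function.comp_def]
  have hxk : x ∈ items.map (·.1) := by
    rw [hkeys]; exact (PySem.Set.mem_ofList number x).mpr hx
  have hnd : (items.map (·.1)).Nodup := by
    rw [hkeys]; exact PySem.Set.nodup_ofList number
  rw [pvStep2_spec items x _ _ hxk hnd, one_mul]
  exact pvCount number x

-- ===== VERDICT (by name: the statement is the Claim_ definition above) =====
theorem element_of_product_spec : Claim_equal_element_of_product := by
  intro number _
  show element_of_product number = element_of_product_alt number
  rw [pvAeq, pvBeq]
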